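-- pv_equiv track=rewrite | github.com/mattcbh/personal-os | scripts/system_health_audit.py | parse_command_output
-- ===== SOURCE A (Python) =====
-- def parse_command_output(text: str) -> dict[str, int]:
--     counts = {"ok": 0, "warn": 0, "fail": 0}
--     for raw_line in text.splitlines():
--         line = raw_line.strip()
--         if line.startswith("OK"):
--             counts["ok"] += 1
--         elif line.startswith("WARN"):
--             counts["warn"] += 1
--         elif line.startswith("FAIL"):
--             counts["fail"] += 1
--     return counts
-- ===== SOURCE B (Python) =====
-- def parse_command_output(text: str) -> dict[str, int]:
--     lines = [raw.strip() for raw in text.splitlines()]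
--     return {key: sum(1 for line in lines if line.startswith(prefix))
--             for key, prefix in (("ok", "OK"), ("warn", "WARN"), ("fail", "FAIL"))}
-- ===== Notes on version B (the rewrite author's own statement) =====
-- stated objective: alternative
-- what changed: Replaces the single stateful pass with an elif chain mutating a counts dict by three independent prefix-count scans (one per status), assembled into the dict at the end; mutual exclusivity of the prefixes makes the totals identical.
import Mathlib
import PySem

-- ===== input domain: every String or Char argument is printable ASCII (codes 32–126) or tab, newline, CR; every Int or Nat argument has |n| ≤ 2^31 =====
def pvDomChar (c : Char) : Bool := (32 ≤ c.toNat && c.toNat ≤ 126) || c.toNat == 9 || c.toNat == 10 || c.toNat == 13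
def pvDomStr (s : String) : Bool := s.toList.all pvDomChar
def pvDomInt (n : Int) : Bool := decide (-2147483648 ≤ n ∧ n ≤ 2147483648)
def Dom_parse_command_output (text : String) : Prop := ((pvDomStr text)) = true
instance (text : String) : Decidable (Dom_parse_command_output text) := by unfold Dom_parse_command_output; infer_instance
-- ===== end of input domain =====

-- B replaces A's single stateful pass (elif chain mutating a counts dict) by three independent
-- prefix-count scans assembled into the dict at the end; alternative decomposition, same cost.

-- ===== PORT A =====
def parse_command_output (text : String) : List (String × Int) :=
  let counts : PySem.Dict String Int :=
    PySem.Dict.ofList [("ok", 0), ("warn", 0), ("fail", 0)]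
  let counts := (PySem.Str.splitlines text).foldl (fun counts raw_line =>
    let line := PySem.Str.strip raw_line
    if PySem.Str.startswith line "OK" then counts.modify "ok" 0 (· + 1)
    else if PySem.Str.startswith line "WARN" then counts.modify "warn" 0 (· + 1)
    else if PySem.Str.startswith line "FAIL" then counts.modify "fail" 0 (· + 1)
    else counts) counts
  counts.items

-- ===== PORT B =====
def parse_command_output_alt (text : String) : List (String × Int) :=
  let lines := (PySem.Str.splitlines text).map PySem.Str.strip
  [("ok",   (lines.countP (fun line => PySem.Str.startswith line "OK")   : Int)),
   ("warn", (lines.countP (fun line => PySem.Str.startswith line "WARN") : Int)),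
   ("fail", (lines.countP (fun line => PySem.Str.startswith line "FAIL") : Int))]

-- ===== PRECONDITION & SPEC =====
def Spec_parse_command_output (text : String) (out : List (String × Int)) : Prop := out = parse_command_output_alt text
instance (text : String) (out : List (String × Int)) : Decidable (Spec_parse_command_output text out) := by unfold Spec_parse_command_output; infer_instance

-- ===== CLAIM (what is proved, stated in full; the proofs are below) =====
def Claim_equal_parse_command_output : Prop := ∀ (text : String), Dom_parse_command_output text → Spec_parse_command_output text (parse_command_output text)

-- ===== LEMMAS AND PROOFS =====

-- two prefixes with distinct first characters cannot both start the same line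
theorem pv_excl {l p1 p2 : List Char} {c1 c2 : Char} (hne : c1 ≠ c2)
    (h : PySem.Chars.startswith l (c1 :: p1) = true) :
    PySem.Chars.startswith l (c2 :: p2) = false := by
  rw [PySem.Chars.startswith_iff] at h
  rw [Bool.eq_false_iff]
  intro h2
  rw [PySem.Chars.startswith_iff] at h2
  obtain ⟨t1, rfl⟩ := h
  obtain ⟨t2, ht⟩ := h2
  simp at ht
  exact hne ht.1.symm

-- invariant of A's loop: starting from arbitrary counts (a, b, c), the fold adds the three prefix counts
theorem pv_loop_counts (lines : List String) (a b c : Int) :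
    (lines.foldl (fun counts raw_line =>
      let line := PySem.Str.strip raw_line
      if PySem.Str.startswith line "OK" then counts.modify "ok" 0 (· + 1)
      else if PySem.Str.startswith line "WARN" then counts.modify "warn" 0 (· + 1)
      else if PySem.Str.startswith line "FAIL" then counts.modify "fail" 0 (· + 1)
      else counts)
      (PySem.Dict.mk [("ok", a), ("warn", b), ("fail", c)])).items
    = [("ok",   a + ((lines.map PySem.Str.strip).countP (fun l => PySem.Str.startswith l "OK")   : Int)),
       ("warn", b + ((lines.map PySem.Str.strip).countP (fun l => PySem.Str.startswith l "WARN") : Int)),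
       ("fail", c + ((lines.map PySem.Str.strip).countP (fun l => PySem.Str.startswith l "FAIL") : Int))] := by
  induction lines generalizing a b c with
  | nil => simp
  | cons x xs ih =>
    rw [List.foldl_cons, List.map_cons, List.countP_cons, List.countP_cons, List.countP_cons]
    by_cases h1 : PySem.Str.startswith (PySem.Str.strip x) "OK" = true
    · have h2 : PySem.Str.startswith (PySem.Str.strip x) "WARN" = false := by
        simp only [PySem.Str.startswith_eq] at h1 ⊢
        exact pv_excl (by decide) h1
      have h3 : PySem.Str.startswith (PySem.Str.strip x) "FAIL" = false := by
        simp only [PySem.Str.startswith_eq] at h1 ⊢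
        exact pv_excl (by decide) h1
      have hd : ((PySem.Dict.mk [("ok", a), ("warn", b), ("fail", c)]).modify "ok" 0 (· + 1))
          = PySem.Dict.mk [("ok", a + 1), ("warn", b), ("fail", c)] := by
        simp [PySem.Dict.modify, PySem.Dict.contains, PySem.Dict.insert, PySem.Dict.getD, PySem.Dict.get?]
      simp only [h1, h2, h3, if_true, if_false, Bool.false_eq_true, hd, ih]
      simp
      omega
    · by_cases h2 : PySem.Str.startswith (PySem.Str.strip x) "WARN" = true
      · have h3 : PySem.Str.startswith (PySem.Str.strip x) "FAIL" = false := by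
          simp only [PySem.Str.startswith_eq] at h2 ⊢
          exact pv_excl (by decide) h2
        have hd : ((PySem.Dict.mk [("ok", a), ("warn", b), ("fail", c)]).modify "warn" 0 (· + 1))
            = PySem.Dict.mk [("ok", a), ("warn", b + 1), ("fail", c)] := by
          simp [PySem.Dict.modify, PySem.Dict.contains, PySem.Dict.insert, PySem.Dict.getD, PySem.Dict.get?]
        simp only [h1, h2, h3, if_true, if_false, Bool.false_eq_true, hd, ih]
        simp
        omega
      · by_cases h3 : PySem.Str.startswith (PySem.Str.strip x) "FAIL" = true
        · have hd : ((PySem.Dict.mk [("ok", a), ("warn", b), ("fail", c)]).modify "fail" 0 (· + 1))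
              = PySem.Dict.mk [("ok", a), ("warn", b), ("fail", c + 1)] := by
            simp [PySem.Dict.modify, PySem.Dict.contains, PySem.Dict.insert, PySem.Dict.getD, PySem.Dict.get?]
          simp only [h1, h2, h3, if_true, if_false, Bool.false_eq_true, hd, ih]
          simp
          omega
        · simp only [h1, h2, h3, if_false, Bool.false_eq_true, ih]
          simp

-- ===== VERDICT (by name: the statement is the Claim_ definition above) =====
theorem parse_command_output_spec : Claim_equal_parse_command_output := by
  intro text _
  unfold Spec_parse_command_output parse_command_output parse_command_output_alt
  simpa [PySem.Dict.ofList] using pv_loop_counts (PySem.Str.splitlines text) 0 0 0
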